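-- pv_equiv track=rewrite | github.com/fpolica91/Solana-Bots | solana_bots/utils/streamer.py | is_valid_stream
-- ===== SOURCE A (Python) =====
-- from typing import List, Dict
--
-- def is_valid_stream(logs: List):
--     has_init = False
--     has_buy = False
--     for msg in logs:
--         if "InitializeMint2" in msg or "Create Metadata Accounts v3" in msg:
--             has_init = True
--         elif "Buy" in msg:
--             has_buy = True
--             break
--     return has_init and has_buy
-- ===== SOURCE B (Python) =====
-- def is_valid_stream(logs):
--     def is_init(msg):
--         return "InitializeMint2" in msg or "Create Metadata Accounts v3" in msg
--     j = next((i for i, msg in enumerate(logs)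
--               if "Buy" in msg and not is_init(msg)), None)
--     if j is None:
--         return False
--     return any(is_init(msg) for msg in logs[:j])
-- ===== Notes on version B (the rewrite author's own statement) =====
-- stated objective: alternative
-- what changed: Replaces A's single stateful early-break scan (two boolean flags mutated in one loop) with a locate-then-test decomposition: first find the index of the first bare 'Buy' message, then check the prefix before it for an init marker.
import Mathlib
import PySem

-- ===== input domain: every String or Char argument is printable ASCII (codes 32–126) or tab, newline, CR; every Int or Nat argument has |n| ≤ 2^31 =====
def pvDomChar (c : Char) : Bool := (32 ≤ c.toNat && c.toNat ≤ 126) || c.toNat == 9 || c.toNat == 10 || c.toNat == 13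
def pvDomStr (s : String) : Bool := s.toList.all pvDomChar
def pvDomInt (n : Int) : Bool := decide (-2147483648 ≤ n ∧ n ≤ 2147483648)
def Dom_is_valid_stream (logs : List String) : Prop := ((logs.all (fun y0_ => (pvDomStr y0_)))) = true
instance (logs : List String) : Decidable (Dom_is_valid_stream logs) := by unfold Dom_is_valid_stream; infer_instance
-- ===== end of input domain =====

-- B replaces A's stateful early-break scan with a locate-first-bare-'Buy'-then-test-prefix decomposition (objective: alternative).

-- ===== PORT A =====
-- A's for-loop with flags has_init/has_buy and break, as structural recursion over logs
def is_valid_stream_loop (logs : List String) (has_init has_buy : Bool) : Bool :=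
  match logs with
  | [] => has_init && has_buy
  | msg :: rest =>
      if PySem.Str.isIn "InitializeMint2" msg || PySem.Str.isIn "Create Metadata Accounts v3" msg then
        is_valid_stream_loop rest true has_buy
      else if PySem.Str.isIn "Buy" msg then
        -- has_buy := true; break; return has_init && has_buy
        has_init && true
      else
        is_valid_stream_loop rest has_init has_buy

def is_valid_stream (logs : List String) : Bool :=
  is_valid_stream_loop logs false false

-- ===== PORT B =====
def pvIsInit (msg : String) : Bool :=
  PySem.Str.isIn "InitializeMint2" msg || PySem.Str.isIn "Create Metadata Accounts v3" msg

def is_valid_stream_alt (logs : List String) : Bool :=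
  match logs.findIdx? (fun msg => PySem.Str.isIn "Buy" msg && !pvIsInit msg) with
  | none => false
  | some j => (logs.take j).any pvIsInit

-- ===== PRECONDITION & SPEC =====
def Spec_is_valid_stream (logs : List String) (out : Bool) : Prop := out = is_valid_stream_alt logs
instance (logs : List String) (out : Bool) : Decidable (Spec_is_valid_stream logs out) := by unfold Spec_is_valid_stream; infer_instance

-- ===== CLAIM (what is proved, stated in full; the proofs are below) =====
def Claim_equal_is_valid_stream : Prop := ∀ (logs : List String), Dom_is_valid_stream logs → Spec_is_valid_stream logs (is_valid_stream logs)

-- ===== LEMMAS AND PROOFS =====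
-- A's loop with the two tests abstracted to opaque predicates (so proofs never unfold the string literals)
def pvLoopG (pI pB : String → Bool) (logs : List String) (hi hb : Bool) : Bool :=
  match logs with
  | [] => hi && hb
  | m :: rest =>
      if pI m then pvLoopG pI pB rest true hb
      else if pB m then hi && true
      else pvLoopG pI pB rest hi hb

lemma is_valid_stream_loop_eq_loopG (logs : List String) (hi hb : Bool) :
    is_valid_stream_loop logs hi hb =
      pvLoopG pvIsInit (fun m => PySem.Str.isIn "Buy" m) logs hi hb := by
  induction logs generalizing hi hb with
  | nil => rfl
  | cons m rest ih => simp [is_valid_stream_loop, pvLoopG, pvIsInit, ih]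

-- Loop invariant: with hb = false, the loop computes hi || (pI holds somewhere before the
-- first message where pB holds and pI does not), and false when no such message exists.
lemma pvLoopG_key (pI pB : String → Bool) (logs : List String) (hi : Bool) :
    pvLoopG pI pB logs hi false =
      (match logs.findIdx? (fun m => pB m && !pI m) with
       | none => false
       | some j => hi || (logs.take j).any pI) := by
  induction logs generalizing hi with
  | nil => simp [pvLoopG]
  | cons m rest ih =>
    by_cases hI : pI m = true
    · rw [show pvLoopG pI pB (m :: rest) hi false = pvLoopG pI pB rest true false from by
        simp [pvLoopG, hI], ih]
      have hp : (pB m && !pI m) = false := by simp [hI]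
      simp only [List.findIdx?_cons, hp, Bool.false_eq_true, if_false]
      cases h : rest.findIdx? (fun m => pB m && !pI m) <;>
        simp [List.take_succ_cons, List.any_cons, hI]
    · have hI' : pI m = false := by simpa using hI
      by_cases hB : pB m = true
      · have hp : (pB m && !pI m) = true := by simp [hB, hI']
        simp [pvLoopG, hI', hB, List.findIdx?_cons]
      · have hB' : pB m = false := by simpa using hB
        rw [show pvLoopG pI pB (m :: rest) hi false = pvLoopG pI pB rest hi false from by
          simp [pvLoopG, hI', hB'], ih]
        have hp : (pB m && !pI m) = false := by simp [hB']
        simp only [List.findIdx?_cons, hp, Bool.false_eq_true, if_false]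
        cases h : rest.findIdx? (fun m => pB m && !pI m) <;>
          simp [List.take_succ_cons, List.any_cons, hI']

-- ===== VERDICT (by name: the statement is the Claim_ definition above) =====
theorem is_valid_stream_spec : Claim_equal_is_valid_stream := by
  intro logs _
  unfold Spec_is_valid_stream is_valid_stream is_valid_stream_alt
  rw [is_valid_stream_loop_eq_loopG, pvLoopG_key]
  cases h : logs.findIdx? (fun msg => PySem.Str.isIn "Buy" msg && !pvIsInit msg) <;> simp
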